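-- pv_equiv track=rewrite | github.com/starswap/CompetitiveProgramming | CodeForces/1930/C.check.py | is_compat
-- ===== SOURCE A (Python) =====
-- def is_compat(p, q):
--     for i in range(len(p)):
--         okThisI = False
--         for l in range(i + 1):
--             for r in range(i, len(p)):
--                 subs = q[l : r + 1]
--                 if subs.count(p[i]) >= len(subs) / 2:
--                     okThisI = True
--         if not okThisI:
--             return False
--     return True
-- ===== SOURCE B (Python) =====
-- def is_compat(p, q):
--     # For each i, p[i] must be a half-majority of some q[l:r+1] with l <= i <= r.
--     # Map q to +1/-1 (match/mismatch), take prefix sums S; the slice condition is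
--     # S[min(r+1, m)] - S[min(l, m)] >= 0, so compare min prefix vs max suffix value.
--     n, m = len(p), len(q)
--     for i in range(n):
--         c = p[i]
--         S = [0]
--         t = 0
--         for ch in q:
--             t += 1 if ch == c else -1
--             S.append(t)
--         lo = min(S[min(l, m)] for l in range(i + 1))
--         hi = max(S[min(r + 1, m)] for r in range(i, n))
--         if hi < lo:
--             return False
--     return True
-- ===== Notes on version B (the rewrite author's own statement) =====
-- stated objective: faster
-- what changed: Replaced the quadruple loop (slice+count per (i,l,r) pair) by a +/-1 prefix-sum transform per position: the half-majority slice condition becomes 'some prefix-sum value at r+1 is >= some prefix-sum value at l', decided by one min over prefixes and one max over suffixes.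
import Mathlib
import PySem

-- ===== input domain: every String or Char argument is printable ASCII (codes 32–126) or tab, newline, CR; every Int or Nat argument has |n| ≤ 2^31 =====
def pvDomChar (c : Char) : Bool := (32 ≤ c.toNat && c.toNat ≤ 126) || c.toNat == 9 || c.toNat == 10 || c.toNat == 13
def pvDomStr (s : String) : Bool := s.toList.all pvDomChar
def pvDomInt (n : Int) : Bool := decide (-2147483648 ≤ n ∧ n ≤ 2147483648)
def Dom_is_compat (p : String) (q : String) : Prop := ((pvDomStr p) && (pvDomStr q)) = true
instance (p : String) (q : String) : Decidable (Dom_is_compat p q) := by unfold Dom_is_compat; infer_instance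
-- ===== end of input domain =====

-- B replaces A's quadruple loop (slice + count per (i,l,r)) by a ±1 prefix-sum transform with
-- one min-over-prefixes / max-over-suffixes comparison per i (objective: faster, asymptotic).

-- ===== PORT A =====
-- 'subs.count(p[i]) >= len(subs) / 2' is ported as 'len(subs) <= 2 * count': exact here, since
-- both sides are integers and Python's float len(subs)/2 is an exact half-integer at these sizes.
-- p[i] is always in range (i from range(len(p))), so pyGetD with a dummy default is exact.
def isCompatOkA (pl ql : List Char) (i : Int) : Bool :=
  (PySem.List.pyRange 0 (i + 1) 1).foldl (fun ok l =>
    (PySem.List.pyRange i (pl.length : Int) 1).foldl (fun ok r =>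
      let subs := PySem.List.slice ql (some l) (some (r + 1))
      if subs.length ≤ 2 * subs.count (PySem.List.pyGetD pl i ' ') then true else ok) ok) false

def isCompatLoopA (pl ql : List Char) : List Int → Bool
  | [] => true
  | i :: rest => if !(isCompatOkA pl ql i) then false else isCompatLoopA pl ql rest

def is_compat (p : String) (q : String) : Bool :=
  isCompatLoopA p.toList q.toList (PySem.List.pyRange 0 ((p.toList.length : Int)) 1)

-- ===== PORT B =====
-- B builds S = prefix sums of (+1 if ch == c else -1) over q, then compares
-- min(S[min(l,m)] for l in range(i+1)) with max(S[min(r+1,m)] for r in range(i,n)).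
def altBuildS (ql : List Char) (c : Char) : List Int :=
  (ql.foldl (fun (st : List Int × Int) ch =>
    let t := st.2 + (if ch == c then 1 else -1)
    (st.1 ++ [t], t)) ([0], 0)).1

-- S[min(l, m)]: the index is always in range (0 ≤ min(l,m) ≤ m < len S), so pyGetD is exact;
-- the min()/max() iterables are nonempty, so .getD 0 never supplies its default.
def altLo (pl ql : List Char) (i : Int) : Int :=
  let m : Int := ql.length
  let S := altBuildS ql (PySem.List.pyGetD pl i ' ')
  (PySem.List.min? ((PySem.List.pyRange 0 (i + 1) 1).map
      (fun l => PySem.List.pyGetD S (min l m) 0)) id).getD 0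

def altHi (pl ql : List Char) (i : Int) : Int :=
  let m : Int := ql.length
  let S := altBuildS ql (PySem.List.pyGetD pl i ' ')
  (PySem.List.max? ((PySem.List.pyRange i (pl.length : Int) 1).map
      (fun r => PySem.List.pyGetD S (min (r + 1) m) 0)) id).getD 0

def altLoop (pl ql : List Char) : List Int → Bool
  | [] => true
  | i :: rest => if altHi pl ql i < altLo pl ql i then false else altLoop pl ql rest

def is_compat_alt (p : String) (q : String) : Bool :=
  altLoop p.toList q.toList (PySem.List.pyRange 0 ((p.toList.length : Int)) 1)

-- ===== PRECONDITION & SPEC =====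
def Spec_is_compat (p : String) (q : String) (out : Bool) : Prop := out = is_compat_alt p q
instance (p : String) (q : String) (out : Bool) : Decidable (Spec_is_compat p q out) := by unfold Spec_is_compat; infer_instance

-- ===== CLAIM (what is proved, stated in full; the proofs are below) =====
def Claim_equal_is_compat : Prop := ∀ (p : String) (q : String), Dom_is_compat p q → Spec_is_compat p q (is_compat p q)

-- ===== LEMMAS AND PROOFS =====

-- fold of "if hit then true else ok" is an 'any'
theorem foldl_if_any {α : Type} (p : α → Prop) [DecidablePred p] :
    ∀ (L : List α) (b : Bool),
      L.foldl (fun ok x => if p x then true else ok) b = (b || L.any (fun x => decide (p x))) := by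
  intro L
  induction L with
  | nil => intro b; simp
  | cons x tl ih =>
      intro b
      simp only [List.foldl_cons, List.any_cons, ih]
      by_cases hp : p x <;> simp [hp]

theorem foldl_or_any {α : Type} (g : α → Bool) :
    ∀ (L : List α) (b : Bool), L.foldl (fun ok x => ok || g x) b = (b || L.any g) := by
  intro L
  induction L with
  | nil => intro b; simp
  | cons x tl ih => intro b; simp only [List.foldl_cons, List.any_cons, ih]; cases b <;> simp

-- the (clamped) prefix-sum function the proofs talk about
def cntF (ql : List Char) (c : Char) (j : Nat) : Int :=
  2 * (((ql.take j).count c : Int)) - j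

-- A's slice test at 0 ≤ a ≤ b equals 'cntF at the clamped endpoints is nondecreasing'
theorem sliceCond_iff (ql : List Char) (c : Char) (a b : Nat) (hab : a ≤ b) :
    ((PySem.List.slice ql (some (a : Int)) (some (b : Int))).length ≤
      2 * (PySem.List.slice ql (some (a : Int)) (some (b : Int))).count c)
    ↔ cntF ql c (min a ql.length) ≤ cntF ql c (min b ql.length) := by
  have hb' : a + (b - a) = b := by omega
  have htd : (List.drop a ql).take (b - a) = (List.take b ql).drop a := by
    rw [List.take_drop, hb']
  have hsplit : List.take b ql = List.take a ql ++ (List.take b ql).drop a := by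
    have h := (List.take_append_drop a (List.take b ql)).symm
    rwa [List.take_take, min_eq_left hab] at h
  have hclamp : ∀ j : Nat, (ql.take (min j ql.length)).count c = (ql.take j).count c := by
    intro j
    rcases le_total j ql.length with h | h
    · rw [min_eq_left h]
    · rw [min_eq_right h, List.take_length, List.take_of_length_le h]
  have hcnt : (List.take b ql).count c
      = (List.take a ql).count c + ((List.take b ql).drop a).count c := by
    conv_lhs => rw [hsplit]
    rw [List.count_append]
  rw [PySem.List.slice_natCast, htd]
  unfold cntF
  rw [hclamp a, hclamp b]
  have hlen : ((List.take b ql).drop a).length = min b ql.length - a := by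
    simp [List.length_drop, List.length_take]
  rw [hlen]
  omega

-- the fold in altBuildS, fully characterised
theorem altBuildS_pair (c : Char) (ql : List Char) :
      ql.foldl (fun (st : List Int × Int) ch =>
        ((st.1 ++ [st.2 + (if ch == c then 1 else -1)]), st.2 + (if ch == c then 1 else -1))) ([0], 0)
      = ((List.range (ql.length + 1)).map (fun k => cntF ql c k), cntF ql c ql.length) := by
  induction ql using List.reverseRecOn with
  | nil => simp [cntF]
  | append_singleton ql ch ih =>
      rw [List.foldl_append, ih]
      have hlast : cntF ql c ql.length + (if ch == c then (1 : Int) else -1)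
          = cntF (ql ++ [ch]) c (ql.length + 1) := by
        simp only [cntF, List.take_of_length_le (le_refl ql.length),
          List.take_of_length_le (by simp : (ql ++ [ch]).length ≤ ql.length + 1),
          List.count_append, List.count_cons, List.count_nil]
        split_ifs <;> push_cast <;> ring
      have hagree : ∀ k ∈ List.range (ql.length + 1), cntF (ql ++ [ch]) c k = cntF ql c k := by
        intro k hk
        have hk' : k ≤ ql.length := by simpa using Nat.lt_succ_iff.mp (List.mem_range.mp hk)
        simp only [cntF, List.take_append_of_le_length hk']
      simp only [List.foldl_cons, List.foldl_nil, List.length_append, List.length_cons,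
        List.length_nil, Nat.zero_add]
      refine Prod.ext ?_ ?_
      · simp only [List.range_succ (n := ql.length + 1), List.map_append, List.map_cons,
          List.map_nil]
        rw [← List.map_congr_left hagree, ← hlast]
      · rw [← hlast]

theorem altBuildS_eq (ql : List Char) (c : Char) :
    altBuildS ql c = (List.range (ql.length + 1)).map (fun k => cntF ql c k) := by
  unfold altBuildS
  exact congrArg Prod.fst (altBuildS_pair c ql)

theorem altBuildS_getD (ql : List Char) (c : Char) (j : Nat) (hj : j ≤ ql.length) :
    (altBuildS ql c).getD j 0 = cntF ql c j := by
  rw [altBuildS_eq]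
  have hjl : j < ((List.range (ql.length + 1)).map (fun k => cntF ql c k)).length := by
    simp [hj]
  rw [List.getD_eq_getElem _ _ hjl]
  simp

-- per-index equivalence of A's inner double loop with B's lo/hi test
theorem per_index (pl ql : List Char) (i : Int) (h0 : 0 ≤ i) (hn : i < (pl.length : Int)) :
    isCompatOkA pl ql i = !(decide (altHi pl ql i < altLo pl ql i)) := by
  set c := PySem.List.pyGetD pl i ' ' with hc
  set S := altBuildS ql c with hS
  set L := PySem.List.pyRange 0 (i + 1) 1 with hL
  set R := PySem.List.pyRange i (pl.length : Int) 1 with hR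
  set hfun := (fun l : Int => PySem.List.pyGetD S (min l (ql.length : Int)) 0) with hh
  set gfun := (fun r : Int => PySem.List.pyGetD S (min (r + 1) (ql.length : Int)) 0) with hg
  -- values of hfun / gfun
  have hval : ∀ l : Int, 0 ≤ l → hfun l = cntF ql c (min l.toNat ql.length) := by
    intro l hl
    have hmin : min l (ql.length : Int) = ((min l.toNat ql.length : Nat) : Int) := by
      push_cast; rw [Int.toNat_of_nonneg hl]
    rw [hh]
    simp only
    rw [hmin, PySem.List.pyGetD_natCast, hS, altBuildS_getD _ _ _ (min_le_right _ _)]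
  have hgval : ∀ r : Int, 0 ≤ r → gfun r = cntF ql c (min (r + 1).toNat ql.length) := by
    intro r hr
    have hmin : min (r + 1) (ql.length : Int) = ((min (r + 1).toNat ql.length : Nat) : Int) := by
      push_cast; rw [Int.toNat_of_nonneg (by omega : (0:Int) ≤ r + 1)]
    rw [hg]
    simp only
    rw [hmin, PySem.List.pyGetD_natCast, hS, altBuildS_getD _ _ _ (min_le_right _ _)]
  -- A's double fold as an 'any' of 'any'
  have hA0 : isCompatOkA pl ql i
      = L.foldl (fun ok l => R.foldl (fun ok r =>
          if ((PySem.List.slice ql (some l) (some (r + 1))).length ≤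
              2 * (PySem.List.slice ql (some l) (some (r + 1))).count c) then true else ok) ok) false := rfl
  have hinner : (fun (ok : Bool) (l : Int) => R.foldl (fun ok r =>
          if ((PySem.List.slice ql (some l) (some (r + 1))).length ≤
              2 * (PySem.List.slice ql (some l) (some (r + 1))).count c) then true else ok) ok)
      = fun (ok : Bool) (l : Int) => ok || R.any (fun r =>
          decide ((PySem.List.slice ql (some l) (some (r + 1))).length ≤
              2 * (PySem.List.slice ql (some l) (some (r + 1))).count c)) := by
    funext ok l
    exact foldl_if_any _ R ok
  rw [hA0, hinner, foldl_or_any, Bool.false_or]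
  -- the shared proposition
  have hcond : ∀ l ∈ L, ∀ r ∈ R,
      (((PySem.List.slice ql (some l) (some (r + 1))).length ≤
        2 * (PySem.List.slice ql (some l) (some (r + 1))).count c) ↔ hfun l ≤ gfun r) := by
    intro l hlL r hrR
    have hlb := PySem.List.mem_pyRange_one.mp hlL
    have hrb := PySem.List.mem_pyRange_one.mp hrR
    have hl0 : 0 ≤ l := hlb.1
    have hr0 : 0 ≤ r := le_trans h0 hrb.1
    have hla : l = ((l.toNat : Nat) : Int) := (Int.toNat_of_nonneg hl0).symm
    have hrb1 : r + 1 = (((r + 1).toNat : Nat) : Int) := (Int.toNat_of_nonneg (by omega)).symm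
    have hab : l.toNat ≤ (r + 1).toNat := by omega
    rw [hval l hl0, hgval r hr0]
    rw [hla]
    conv_lhs => rw [hrb1]
    exact sliceCond_iff ql c l.toNat (r + 1).toNat hab
  -- nonemptiness
  have hLne : L ≠ [] := by
    intro h
    have := congrArg List.length h
    rw [hL, PySem.List.length_pyRange_one] at this
    simp at this
    omega
  have hRne : R ≠ [] := by
    intro h
    have := congrArg List.length h
    rw [hR, PySem.List.length_pyRange_one] at this
    simp at this
    omega
  -- lo / hi as actual min / max elements
  obtain ⟨lo, hlo⟩ : ∃ lo, PySem.List.min? (L.map hfun) id = some lo := by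
    cases hm : PySem.List.min? (L.map hfun) id with
    | none => exact absurd (List.map_eq_nil_iff.mp ((PySem.List.min?_eq_none_iff _ _).mp hm)) hLne
    | some v => exact ⟨v, rfl⟩
  obtain ⟨hi, hhi⟩ : ∃ hi, PySem.List.max? (R.map gfun) id = some hi := by
    cases hm : PySem.List.max? (R.map gfun) id with
    | none => exact absurd (List.map_eq_nil_iff.mp ((PySem.List.max?_eq_none_iff _ _).mp hm)) hRne
    | some v => exact ⟨v, rfl⟩
  have haltLo : altLo pl ql i = lo := by
    have : altLo pl ql i = (PySem.List.min? (L.map hfun) id).getD 0 := rfl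
    rw [this, hlo]; rfl
  have haltHi : altHi pl ql i = hi := by
    have : altHi pl ql i = (PySem.List.max? (R.map gfun) id).getD 0 := rfl
    rw [this, hhi]; rfl
  -- both sides decide the same proposition
  have hP : (L.any fun l => R.any fun r =>
        decide ((PySem.List.slice ql (some l) (some (r + 1))).length ≤
          2 * (PySem.List.slice ql (some l) (some (r + 1))).count c)) = true
      ↔ lo ≤ hi := by
    constructor
    · intro h
      obtain ⟨l, hlL, hrest⟩ := List.any_eq_true.mp h
      obtain ⟨r, hrR, hcnd⟩ := List.any_eq_true.mp hrest
      have hle : hfun l ≤ gfun r := (hcond l hlL r hrR).mp (of_decide_eq_true hcnd)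
      have h1 : lo ≤ hfun l := PySem.List.min?_isMin hlo (hfun l) (List.mem_map_of_mem hlL)
      have h2 : gfun r ≤ hi := PySem.List.max?_isMax hhi (gfun r) (List.mem_map_of_mem hrR)
      exact le_trans h1 (le_trans hle h2)
    · intro h
      obtain ⟨l0, hl0L, hl0e⟩ := List.mem_map.mp (PySem.List.min?_mem hlo)
      obtain ⟨r0, hr0R, hr0e⟩ := List.mem_map.mp (PySem.List.max?_mem hhi)
      refine List.any_eq_true.mpr ⟨l0, hl0L, List.any_eq_true.mpr ⟨r0, hr0R, decide_eq_true ?_⟩⟩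
      exact (hcond l0 hl0L r0 hr0R).mpr (by rw [hl0e, hr0e]; exact h)
  rw [haltLo, haltHi]
  rcases le_or_gt lo hi with hle | hgt
  · rw [hP.mpr hle]
    simp [not_lt.mpr hle]
  · have : ¬ (lo ≤ hi) := not_le.mpr hgt
    rw [Bool.eq_iff_iff]
    simp [hgt, this, hP]

theorem loops_eq (pl ql : List Char) :
    ∀ L : List Int, (∀ i ∈ L, 0 ≤ i ∧ i < (pl.length : Int)) →
      isCompatLoopA pl ql L = altLoop pl ql L := by
  intro L
  induction L with
  | nil => intro _; rfl
  | cons i tl ih =>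
      intro h
      have hi := h i (List.mem_cons_self ..)
      have hok := per_index pl ql i hi.1 hi.2
      simp only [isCompatLoopA, altLoop, hok]
      by_cases hb : altHi pl ql i < altLo pl ql i
      · simp [hb]
      · simp [hb, ih (fun j hj => h j (List.mem_cons_of_mem _ hj))]

-- ===== VERDICT (by name: the statement is the Claim_ definition above) =====
theorem is_compat_spec : Claim_equal_is_compat := by
  intro p q _
  unfold Spec_is_compat is_compat is_compat_alt
  exact loops_eq p.toList q.toList _ (fun i hi => by
    have := PySem.List.mem_pyRange_one.mp hi
    exact ⟨this.1, this.2⟩)
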